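-- pv_equiv track=rewrite | github.com/zachvoll/Sudoku | sudokuGen.py | reviseG
-- ===== SOURCE A (Python) =====
-- from copy import deepcopy
--
-- def reviseG(domain1, domain2):
--
-- 	# copy domains for use with iteration (they might change inside the for loops)
-- 	dom1 = deepcopy(domain1)
-- 	dom2 = deepcopy(domain2)
--
-- 	revised = False
-- 	for x in dom1:
-- 		satisfied = False
-- 		for y in dom2:
-- 			satisfied = (x != y)
-- 			if satisfied:
-- 				break
-- 		if not satisfied:
-- 			domain1.remove(x)
-- 			revised = True
--
-- 	return revised
-- ===== SOURCE B (Python) =====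
-- def reviseG(domain1, domain2):
--     # Case analysis on the distinct values of domain2 instead of a per-element inner scan.
--     d = set(domain2)
--     if len(d) >= 2:
--         # some y differs from any x, nothing is ever removed
--         return False
--     if len(d) == 1:
--         v = next(iter(d))
--         revised = v in domain1
--         domain1[:] = [x for x in domain1 if x != v]
--         return revised
--     # domain2 empty: every x fails, domain1 is emptied
--     revised = bool(domain1)
--     domain1[:] = []
--     return revised
-- ===== Notes on version B (the rewrite author's own statement) =====
-- stated objective: simpler
-- what changed: Replaces A's outer loop with inner scan and in-place remove() calls by a single case analysis on the distinct values of domain2 (>=2 distinct: nothing removed; exactly one value v: remove all v's; empty: clear domain1), rebuilding domain1 with one filter.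
import Mathlib
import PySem

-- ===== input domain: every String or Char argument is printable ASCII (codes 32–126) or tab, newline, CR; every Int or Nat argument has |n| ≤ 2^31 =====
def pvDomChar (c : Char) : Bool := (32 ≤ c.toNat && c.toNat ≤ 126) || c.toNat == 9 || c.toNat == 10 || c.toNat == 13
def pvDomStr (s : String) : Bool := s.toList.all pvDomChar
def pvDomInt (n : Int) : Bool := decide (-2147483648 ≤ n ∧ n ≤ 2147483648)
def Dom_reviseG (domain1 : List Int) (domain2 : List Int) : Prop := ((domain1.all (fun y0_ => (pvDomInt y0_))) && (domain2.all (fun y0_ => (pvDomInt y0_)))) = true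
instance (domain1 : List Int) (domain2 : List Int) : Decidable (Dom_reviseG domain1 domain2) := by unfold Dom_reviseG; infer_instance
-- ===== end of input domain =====

-- Header: B replaces A's nested scan + in-place remove() by one case analysis on the distinct
-- values of domain2 (objective: simpler). Both Pythons mutate domain1 in place identically;
-- the equivalence proved here is about the RETURN value only.


-- ===== PORT A =====
-- inner 'for y in dom2: satisfied = (x != y); if satisfied: break' — final value of satisfied
def satLoopA (x : Int) : List Int → Bool
  | [] => false
  | y :: ys => if x ≠ y then true else satLoopA x ys

-- outer loop state: (current domain1 list, revised). domain1.remove(x) never raises here,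
-- so the total .getD form is exact.
def reviseG (domain1 : List Int) (domain2 : List Int) : Bool :=
  (domain1.foldl
    (fun s x =>
      let satisfied := satLoopA x domain2
      if ¬ satisfied then ((PySem.List.remove? s.1 x).getD s.1, true) else s)
    (domain1, false)).2

-- ===== PORT B =====
def reviseG_alt (domain1 : List Int) (domain2 : List Int) : Bool :=
  let d := PySem.Set.ofList domain2
  match d with
  | _ :: _ :: _ => false                 -- len(d) >= 2
  | [v] => domain1.contains v            -- revised = v in domain1 (domain1 filtered in Python)
  | [] => !domain1.isEmpty               -- revised = bool(domain1) (domain1 cleared in Python)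

-- ===== PRECONDITION & SPEC =====
def Spec_reviseG (domain1 : List Int) (domain2 : List Int) (out : Bool) : Prop := out = reviseG_alt domain1 domain2
instance (domain1 : List Int) (domain2 : List Int) (out : Bool) : Decidable (Spec_reviseG domain1 domain2 out) := by unfold Spec_reviseG; infer_instance

-- ===== CLAIM (what is proved, stated in full; the proofs are below) =====
def Claim_equal_reviseG : Prop := ∀ (domain1 : List Int) (domain2 : List Int), Dom_reviseG domain1 domain2 → Spec_reviseG domain1 domain2 (reviseG domain1 domain2)

-- ===== LEMMAS AND PROOFS =====

lemma satLoopA_eq (x : Int) (l : List Int) : satLoopA x l = l.any (fun y => !decide (x = y)) := by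
  induction l with
  | nil => rfl
  | cons y ys ih =>
      by_cases h : x = y
      · subst h; simp [satLoopA, ih]
      · simp [satLoopA, h]

lemma reviseG_foldl_snd (d2 : List Int) (l : List Int) (s : List Int × Bool) :
    (l.foldl
      (fun s x =>
        let satisfied := satLoopA x d2
        if ¬ satisfied then ((PySem.List.remove? s.1 x).getD s.1, true) else s)
      s).2 = (s.2 || l.any (fun x => ! satLoopA x d2)) := by
  induction l generalizing s with
  | nil => simp
  | cons x xs ih =>
      simp only [List.foldl_cons, List.any_cons, ih]
      by_cases h : satLoopA x d2 = true <;> simp [h, Bool.or_comm]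

lemma reviseG_char (d1 d2 : List Int) :
    reviseG d1 d2 = d1.any (fun x => d2.all (fun y => decide (x = y))) := by
  unfold reviseG
  rw [reviseG_foldl_snd]
  simp [satLoopA_eq, List.all_eq_not_any_not]

-- ===== VERDICT (by name: the statement is the Claim_ definition above) =====
theorem reviseG_spec : Claim_equal_reviseG := by
  intro d1 d2 _
  show reviseG d1 d2 = reviseG_alt d1 d2
  rw [reviseG_char]
  unfold reviseG_alt
  have hmem : ∀ y : Int, y ∈ d2 ↔ y ∈ PySem.Set.ofList d2 := fun y => Iff.symm (PySem.Set.mem_ofList d2 y)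
  have hnd : (PySem.Set.ofList d2).Nodup := PySem.Set.nodup_ofList d2
  cases hset : PySem.Set.ofList d2 with
  | nil =>
      have h2 : d2 = [] := by
        cases d2 with
        | nil => rfl
        | cons a t => exact absurd ((hmem a).mp List.mem_cons_self) (by simp [hset])
      subst h2
      cases d1 <;> simp
  | cons v rest =>
      cases rest with
      | nil =>
          have hv : v ∈ d2 := (hmem v).mpr (by simp [hset])
          have hall : ∀ y ∈ d2, y = v := by
            intro y hy
            simpa [hset] using (hmem y).mp hy
          have hall2 : ∀ x : Int, (d2.all (fun y => decide (x = y))) = decide (x = v) := by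
            intro x
            rw [Bool.eq_iff_iff]
            simp only [List.all_eq_true, decide_eq_true_eq]
            constructor
            · exact fun h => h v hv
            · intro h y hy
              rw [h, ← hall y hy]
          simp only [hall2]
          rw [Bool.eq_iff_iff]
          simp [List.any_eq_true]
      | cons w rest2 =>
          have hv : v ∈ d2 := (hmem v).mpr (by simp [hset])
          have hw : w ∈ d2 := (hmem w).mpr (by simp [hset])
          have hvw : v ≠ w := by
            rw [hset] at hnd
            intro h
            exact (List.nodup_cons.mp hnd).1 (by simp [h])
          rw [List.any_eq_false]
          intro x hx
          simp only [List.all_eq_true, decide_eq_true_eq]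
          push Not
          by_cases hxv : x = v
          · exact ⟨w, hw, by rw [hxv]; exact hvw⟩
          · exact ⟨v, hv, hxv⟩
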